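-- pv_equiv track=rewrite | github.com/EHMikel/master_inteligencia_artificial_VIU | 00_complementos_formativos/Herramientas de programacion/Materiales del profesor/ejercicios propuestos que no puntuan/EjerciciosTema3/Ejercicios/Ex_3_1_diccionarios.py | Agenda2
-- ===== SOURCE A (Python) =====
-- def Agenda2(lst):
--     """
--     >>> lst2 = [["Luisa", "931111111"], ["José", "912222222"], \
--         ["Judith", "96919391"], ["Luisa", "65555555"], ["José", "61133333"]]
--     >>> L2 = Agenda2(lst2)
--     >>> L2 == {'José': ['912222222', '61133333'], \
--                'Luisa': ['931111111', '65555555'], 'Judith': ['96919391']}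
--     True
--     """
--     d = {}
--     for item in lst:
--         if item[0] not in d:
--             d[item[0]] = [item[1]]
--         else:
--             d[item[0]].append(item[1])
--     return d
-- ===== SOURCE B (Python) =====
-- def Agenda2(lst):
--     order = list(dict.fromkeys(item[0] for item in lst))
--     return {name: [item[1] for item in lst if item[0] == name] for name in order}
-- ===== Notes on version B (the rewrite author's own statement) =====
-- stated objective: alternative
-- what changed: Replaces the single guarded-append dict-building pass with an index-first decomposition: compute the distinct names in first-seen order via dict.fromkeys, then build the result with a dict comprehension that rescans the list once per name.
import Mathlib
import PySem

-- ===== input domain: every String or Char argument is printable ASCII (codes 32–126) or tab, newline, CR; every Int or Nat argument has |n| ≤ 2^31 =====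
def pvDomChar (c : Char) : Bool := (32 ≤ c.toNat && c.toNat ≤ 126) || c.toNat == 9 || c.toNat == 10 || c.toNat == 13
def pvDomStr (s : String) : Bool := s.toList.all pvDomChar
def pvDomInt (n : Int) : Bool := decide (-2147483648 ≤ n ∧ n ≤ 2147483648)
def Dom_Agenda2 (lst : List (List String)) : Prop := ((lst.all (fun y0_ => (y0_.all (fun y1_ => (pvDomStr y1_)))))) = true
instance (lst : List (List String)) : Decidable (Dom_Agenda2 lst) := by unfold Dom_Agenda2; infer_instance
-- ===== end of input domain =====

-- B groups by a different decomposition (distinct names first, then one rescan per name); same return value as A on Pre_.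
-- ===== PORT A =====
-- d = {}; for item in lst: if item[0] not in d: d[item[0]] = [item[1]] else: d[item[0]].append(item[1]); return d
-- (item[0]/item[1] are safe under Pre_; ported as pyGetD with a dummy default "")
def Agenda2 (lst : List (List String)) : List (String × List String) :=
  (lst.foldl (fun d item =>
      if d.contains (PySem.List.pyGetD item 0 "") = false then
        d.insert (PySem.List.pyGetD item 0 "") [PySem.List.pyGetD item 1 ""]
      else
        d.modify (PySem.List.pyGetD item 0 "") [] (fun l => l ++ [PySem.List.pyGetD item 1 ""]))
    (PySem.Dict.empty : PySem.Dict String (List String))).items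

-- ===== PORT B =====
-- order = list(dict.fromkeys(item[0] for item in lst)); return {name: [item[1] for item in lst if item[0] == name] for name in order}
def Agenda2_alt (lst : List (List String)) : List (String × List String) :=
  let order := PySem.List.dedup (lst.map (fun item => PySem.List.pyGetD item 0 ""))
  (order.foldl (fun d name =>
      d.insert name ((lst.filter (fun item => PySem.List.pyGetD item 0 "" == name)).map
        (fun item => PySem.List.pyGetD item 1 "")))
    (PySem.Dict.empty : PySem.Dict String (List String))).items

-- ===== PRECONDITION & SPEC =====
-- Pre_ excludes inner lists with fewer than two elements, on which Python A raises IndexError.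
def Pre_Agenda2 (lst : List (List String)) : Prop := ∀ item ∈ lst, 2 ≤ item.length
instance (lst : List (List String)) : Decidable (Pre_Agenda2 lst) := by unfold Pre_Agenda2; infer_instance
def pvWitness_Agenda2 : List (List String) := [["Luisa", "931111111"], ["Luisa", "65555555"], ["Judith", "96919391"]]
def Spec_Agenda2 (lst : List (List String)) (out : List (String × List String)) : Prop := out = Agenda2_alt lst
instance (lst : List (List String)) (out : List (String × List String)) : Decidable (Spec_Agenda2 lst out) := by unfold Spec_Agenda2; infer_instance

-- ===== CLAIM (what is proved, stated in full; the proofs are below) =====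
def Claim_equal_Agenda2 : Prop := ∀ (lst : List (List String)), Dom_Agenda2 lst → Pre_Agenda2 lst → Spec_Agenda2 lst (Agenda2 lst)

-- ===== LEMMAS AND PROOFS =====

-- common: the grouped assoc list both ports compute
def pvGroup (lst : List (List String)) : List (String × List String) :=
  (PySem.Set.ofList (lst.map (fun it => PySem.List.pyGetD it 0 ""))).map
    (fun k => (k, (lst.filter (fun it => PySem.List.pyGetD it 0 "" == k)).map
      (fun it => PySem.List.pyGetD it 1 "")))

lemma A_eq_group (lst : List (List String)) : Agenda2 lst = pvGroup lst := by
  unfold Agenda2 pvGroup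
  have h1 : (List.foldl (fun d it =>
      if d.contains (PySem.List.pyGetD it 0 "") = false then
        d.insert (PySem.List.pyGetD it 0 "") [PySem.List.pyGetD it 1 ""]
      else d.modify (PySem.List.pyGetD it 0 "") [] (fun l => l ++ [PySem.List.pyGetD it 1 ""]))
      (PySem.Dict.empty : PySem.Dict String (List String)) lst) =
    ((lst.map (fun it => (PySem.List.pyGetD it 0 "", PySem.List.pyGetD it 1 ""))).foldl
      (fun d p => d.modify p.1 [] (fun l => l ++ [p.2])) PySem.Dict.empty) := by
    rw [List.foldl_map]
    apply PySem.List.foldl_congr_mem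
    intro d it _
    by_cases h : d.contains (PySem.List.pyGetD it 0 "") = false
    · simp [h, PySem.Dict.modify, PySem.Dict.getD_of_not_contains d [] h]
    · simp [h]
  rw [h1]
  set pairs := lst.map (fun it => (PySem.List.pyGetD it 0 "", PySem.List.pyGetD it 1 "")) with hpairs
  have hnd : ((pairs.foldl (fun d p => d.modify p.1 [] (fun l => l ++ [p.2]))
      (PySem.Dict.empty : PySem.Dict String (List String)))).keys.Nodup := by
    apply PySem.Dict.nodup_keys_foldl_modify_key pairs Prod.fst [] (fun _ p => (fun l => l ++ [p.2]))
    simp [PySem.Dict.keys_empty]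
  rw [PySem.Dict.items_eq_map_keys _ hnd []]
  have hkeys : ((pairs.foldl (fun d p => d.modify p.1 [] (fun l => l ++ [p.2]))
      (PySem.Dict.empty : PySem.Dict String (List String)))).keys
      = PySem.Set.ofList (lst.map (fun it => PySem.List.pyGetD it 0 "")) := by
    rw [PySem.Dict.keys_foldl_modify_key pairs Prod.fst [] (fun _ p => (fun l => l ++ [p.2]))]
    simp [PySem.Dict.keys_empty, PySem.Set.update_nil_left, hpairs, List.map_map]
    rfl
  rw [hkeys]
  apply List.map_congr_left
  intro k _
  rw [PySem.Dict.getD_foldl_modify_append]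
  simp [hpairs, List.filter_map, List.map_map, Function.comp_def, PySem.Dict.getD_empty]

lemma B_eq_group (lst : List (List String)) : Agenda2_alt lst = pvGroup lst := by
  unfold Agenda2_alt pvGroup
  rw [PySem.List.dedup_eq_ofList]
  rw [PySem.Dict.items_foldl_insert_fresh _ (fun name => name)
      (fun name => (lst.filter (fun it => PySem.List.pyGetD it 0 "" == name)).map
        (fun it => PySem.List.pyGetD it 1 "")) _
      (fun a _ => PySem.Dict.contains_empty a)
      (by simp [PySem.Set.nodup_ofList])]
  simp [PySem.Dict.empty]

lemma main_eq (lst : List (List String)) : Agenda2 lst = Agenda2_alt lst := by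
  rw [A_eq_group, B_eq_group]

-- ===== VERDICT (by name: the statement is the Claim_ definition above) =====
theorem Agenda2_spec : Claim_equal_Agenda2 := by
  intro lst _ _
  exact main_eq lst
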